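-- pv_equiv track=rewrite | github.com/MGKKEII/Lab7-White-box-testing-653380028-0 | Line_Coverage.py | count_clumps
-- ===== SOURCE A (Python) =====
-- def count_clumps(nums):
--     """
--     Counts the number of "clumps" in a list of integers.
--     A clump is a run of 2 or more of the same adjacent numbers.
--
--     Args:
--         nums: A list of integers.
--
--     Returns:
--         The number of clumps in the list.
--     """
--     if nums is None or len(nums) == 0:
--         return 0
--     count = 0
--     prev = nums[0]
--     in_clump = False
--
--     for i in range(1, len(nums)):
--         if nums[i] == prev:
--             if not in_clump:
--                 in_clump = True
--                 count += 1
--         else: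
--             in_clump = False
--         prev = nums[i]
--
--     return count
-- ===== SOURCE B (Python) =====
-- def count_clumps(nums):
--     if nums is None or len(nums) < 2:
--         return 0
--     first = 1 if nums[0] == nums[1] else 0
--     return first + sum(1 for a, b, c in zip(nums, nums[1:], nums[2:]) if a != b and b == c)
-- ===== Notes on version B (the rewrite author's own statement) =====
-- stated objective: idiomatic
-- what changed: Replaces the stateful prev/in_clump positional loop by a stateless count of run starts: one zip over consecutive triples plus a separate check of the first pair.
import Mathlib
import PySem

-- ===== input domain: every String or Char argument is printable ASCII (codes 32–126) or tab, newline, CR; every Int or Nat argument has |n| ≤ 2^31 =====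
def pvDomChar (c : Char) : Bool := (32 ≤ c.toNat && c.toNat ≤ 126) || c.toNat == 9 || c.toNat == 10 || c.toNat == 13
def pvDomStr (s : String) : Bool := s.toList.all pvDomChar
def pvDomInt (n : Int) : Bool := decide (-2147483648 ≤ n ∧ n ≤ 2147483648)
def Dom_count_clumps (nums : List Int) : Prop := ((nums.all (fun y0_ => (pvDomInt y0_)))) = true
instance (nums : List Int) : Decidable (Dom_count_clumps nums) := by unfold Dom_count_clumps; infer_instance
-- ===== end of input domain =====

-- B replaces A's stateful prev/in_clump loop with a stateless count of run starts (first-pair check + one zip over consecutive triples); same O(n) cost, equivalence proved on all inputs.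


-- ===== PORT A =====
-- for-loop of A as structural recursion over the tail, same state (count, prev, in_clump)
def loopA (count prev : Int) (inClump : Bool) : List Int → Int
  | [] => count
  | x :: xs =>
    if x = prev then
      if !inClump then loopA (count + 1) x true xs
      else loopA count x true xs
    else loopA count x false xs

def count_clumps (nums : List Int) : Int :=
  match nums with
  | [] => 0
  | p :: rest => loopA 0 p false rest

-- ===== PORT B =====
-- the sum-over-zip comprehension of Source B: consecutive triples (a,b,c) with a ≠ b ∧ b = c
def tripleCount (nums : List Int) : Int :=
  ((nums.zip (nums.tail.zip nums.tail.tail)).filter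
    (fun t => decide (t.1 ≠ t.2.1 ∧ t.2.1 = t.2.2))).length

def count_clumps_alt (nums : List Int) : Int :=
  if nums.length < 2 then 0
  else (if nums.getD 0 0 = nums.getD 1 0 then 1 else 0) + tripleCount nums

-- ===== PRECONDITION & SPEC =====
def Spec_count_clumps (nums : List Int) (out : Int) : Prop := out = count_clumps_alt nums
instance (nums : List Int) (out : Int) : Decidable (Spec_count_clumps nums out) := by unfold Spec_count_clumps; infer_instance

-- ===== CLAIM (what is proved, stated in full; the proofs are below) =====
def Claim_equal_count_clumps : Prop := ∀ (nums : List Int), Dom_count_clumps nums → Spec_count_clumps nums (count_clumps nums)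

-- ===== LEMMAS AND PROOFS =====

-- ===== VERDICT (by name: the statement is the Claim_ definition above) =====
-- recursive characterisation of tripleCount
def trip : List Int → Int
  | a :: b :: c :: rest => (if a ≠ b ∧ b = c then 1 else 0) + trip (b :: c :: rest)
  | _ => 0

def hd1 (x : Int) : List Int → Int
  | [] => 0
  | y :: _ => if y = x then 1 else 0

lemma tripleCount_eq_trip : ∀ l : List Int, tripleCount l = trip l := by
  intro l
  induction l with
  | nil => rfl
  | cons a l ih =>
    match l, ih with
    | [], _ => rfl
    | [b], _ => rfl
    | b :: c :: rest, ih =>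
      have ih' : tripleCount (b :: c :: rest) = trip (b :: c :: rest) := ih
      simp only [tripleCount, List.tail_cons, List.zip_cons_cons, List.filter_cons] at ih' ⊢
      rw [trip]
      by_cases h : a ≠ b ∧ b = c
      · rw [if_pos (decide_eq_true h), if_pos h, List.length_cons]
        push_cast
        omega
      · rw [if_neg (by simpa using h), if_neg h]
        omega

lemma loopA_spec : ∀ (l : List Int) (c x : Int),
    loopA c x true l = c + trip (x :: l) ∧
    loopA c x false l = c + hd1 x l + trip (x :: l) := by
  intro l
  induction l with
  | nil => intro c x; simp [loopA, trip, hd1]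
  | cons y ys ih =>
    intro c x
    constructor
    · simp only [loopA, Bool.not_true, Bool.false_eq_true, if_false]
      by_cases h : y = x
      · subst h
        rw [if_pos rfl, (ih c y).1]
        cases ys with
        | nil => simp [trip]
        | cons z zs => simp [trip]
      · rw [if_neg h, (ih c y).2]
        have hne : x ≠ y := fun hxy => h hxy.symm
        cases ys with
        | nil => simp [trip, hd1]
        | cons z zs =>
          simp only [trip, hd1]
          by_cases hz : z = y <;> simp [hz, hne] <;> omega
    · simp only [loopA, Bool.not_false, if_true]
      by_cases h : y = x
      · subst h
        rw [if_pos rfl, (ih (c + 1) y).1]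
        cases ys with
        | nil => simp [trip, hd1]
        | cons z zs => simp [trip, hd1]
      · rw [if_neg h, (ih c y).2]
        have hne : x ≠ y := fun hxy => h hxy.symm
        cases ys with
        | nil => simp [trip, hd1, h]
        | cons z zs =>
          simp only [trip, hd1, if_neg h]
          by_cases hz : z = y <;> simp [hz, hne] <;> omega

theorem count_clumps_spec : Claim_equal_count_clumps := by
  intro nums _
  show count_clumps nums = count_clumps_alt nums
  match nums with
  | [] => rfl
  | [p] => simp [count_clumps, count_clumps_alt, loopA]
  | p :: q :: rs =>
    show loopA 0 p false (q :: rs) = count_clumps_alt (p :: q :: rs)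
    rw [(loopA_spec (q :: rs) 0 p).2]
    unfold count_clumps_alt
    rw [if_neg (by simp), tripleCount_eq_trip]
    simp only [hd1, List.getD, List.getElem?_cons_zero, List.getElem?_cons_succ, Option.getD_some]
    by_cases h : q = p
    · subst h; simp
    · rw [if_neg h, if_neg (fun e => h e.symm)]
      omega
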